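-- pv_equiv track=rewrite | github.com/kuhyx/testsAndMisc | linux_configuration/scripts/digital_wellbeing/focus_mode_daemon.py | is_browser_running
-- ===== SOURCE A (Python) =====
-- BROWSER_PATTERNS = frozenset(
--     [
--         "firefox",
--         "firefox-esr",
--         "librewolf",
--         "chromium",
--         "chrome",
--         "google-chrome",
--         "brave",
--         "vivaldi",
--         "opera",
--         "microsoft-edge",
--         "ungoogled-chromium",
--         "thorium",
--     ]
-- )
--
-- ELECTRON_IGNORE = frozenset(
--     [
--         "electron",
--         "code",  # VS Code
--         "chrome_crashpad",  # Crashpad handler used by all Electron apps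
--     ]
-- )
--
-- IGNORE_PATTERNS = frozenset(
--     [
--         "crashhandler",
--         "update",
--         "helper",
--         "crashpad",
--     ]
-- )
--
-- def is_browser_running(processes: set[str]) -> bool:
--     """Check if any browser is running."""
--     for proc in processes:
--         if proc in ELECTRON_IGNORE:
--             continue
--         if any(ign in proc for ign in IGNORE_PATTERNS):
--             continue
--         if proc in BROWSER_PATTERNS:
--             return True
--     return False
-- ===== SOURCE B (Python) =====
-- BROWSER_PATTERNS = frozenset(
--     [
--         "firefox",
--         "firefox-esr",
--         "librewolf",
--         "chromium",
--         "chrome",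
--         "google-chrome",
--         "brave",
--         "vivaldi",
--         "opera",
--         "microsoft-edge",
--         "ungoogled-chromium",
--         "thorium",
--     ]
-- )
--
--
-- def is_browser_running(processes: set[str]) -> bool:
--     """Check if any browser is running."""
--     # The ignore filters of the original are dead code for browser names:
--     # no browser name is an Electron name or contains an ignore substring.
--     return not BROWSER_PATTERNS.isdisjoint(processes)
-- ===== Notes on version B (the rewrite author's own statement) =====
-- stated objective: simpler
-- what changed: Replaced the per-process loop with its two ignore guards by a single set-disjointness test against BROWSER_PATTERNS; the guards are dead code for browser names, so the result is just whether the sets intersect.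
import Mathlib
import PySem

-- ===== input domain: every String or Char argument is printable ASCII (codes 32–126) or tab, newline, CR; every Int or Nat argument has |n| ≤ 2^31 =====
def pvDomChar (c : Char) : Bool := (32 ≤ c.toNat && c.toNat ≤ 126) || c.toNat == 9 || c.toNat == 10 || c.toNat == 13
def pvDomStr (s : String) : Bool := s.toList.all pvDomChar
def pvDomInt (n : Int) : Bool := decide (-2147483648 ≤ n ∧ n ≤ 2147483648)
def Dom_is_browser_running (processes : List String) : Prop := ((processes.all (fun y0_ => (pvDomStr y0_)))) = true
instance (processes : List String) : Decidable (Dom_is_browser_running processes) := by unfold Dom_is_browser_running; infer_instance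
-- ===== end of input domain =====

-- B replaces A's loop-with-ignore-guards by a single set-intersection test (simpler; the guards are dead code for browser names).

-- module constants (shared data, no logic)
def browserPatterns : List String :=
  ["firefox", "firefox-esr", "librewolf", "chromium", "chrome", "google-chrome",
   "brave", "vivaldi", "opera", "microsoft-edge", "ungoogled-chromium", "thorium"]

def electronIgnore : List String := ["electron", "code", "chrome_crashpad"]

def ignorePatterns : List String := ["crashhandler", "update", "helper", "crashpad"]

-- ===== PORT A =====
-- for proc in processes: continue on the two guards, return True on a browser match; else False
def is_browser_running (processes : List String) : Bool :=
  processes.any (fun proc =>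
    if electronIgnore.contains proc then false
    else if ignorePatterns.any (fun ign => PySem.Str.isIn ign proc) then false
    else browserPatterns.contains proc)

-- ===== PORT B =====
-- `not BROWSER_PATTERNS.isdisjoint(processes)` = the set intersection is nonempty (exact: bool of truth value)
def is_browser_running_alt (processes : List String) : Bool :=
  !(PySem.Set.inter browserPatterns processes).isEmpty

-- ===== PRECONDITION & SPEC =====
def Spec_is_browser_running (processes : List String) (out : Bool) : Prop := out = is_browser_running_alt processes
instance (processes : List String) (out : Bool) : Decidable (Spec_is_browser_running processes out) := by unfold Spec_is_browser_running; infer_instance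

-- ===== CLAIM (what is proved, stated in full; the proofs are below) =====
def Claim_equal_is_browser_running : Prop := ∀ (processes : List String), Dom_is_browser_running processes → Spec_is_browser_running processes (is_browser_running processes)

-- ===== LEMMAS AND PROOFS =====

-- The ignore guards never fire on a browser name (finite check over the 12 names),
-- so A's loop body is just membership in browserPatterns.
theorem body_eq_contains (proc : String) :
    (if electronIgnore.contains proc then false
     else if ignorePatterns.any (fun ign => PySem.Str.isIn ign proc) then false
     else browserPatterns.contains proc) = browserPatterns.contains proc := by
  by_cases hb : browserPatterns.contains proc = true
  · have hmem : proc ∈ browserPatterns := by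
      simpa using hb
    fin_cases hmem <;> decide
  · simp only [Bool.not_eq_true] at hb
    rw [hb]
    split_ifs <;> rfl

theorem is_browser_running_spec : Claim_equal_is_browser_running := by
  intro processes _
  unfold Spec_is_browser_running is_browser_running is_browser_running_alt
  simp only [body_eq_contains]
  rcases h : (PySem.Set.inter browserPatterns processes).isEmpty with _ | _
  · -- intersection nonempty: some browser name is in processes
    rcases List.isEmpty_eq_false_iff_exists_mem.mp h with ⟨y, hy⟩
    have := (PySem.Set.mem_inter browserPatterns processes y).mp hy
    simp only [Bool.not_false]
    rw [List.any_eq_true]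
    exact ⟨y, this.2, by simpa using this.1⟩
  · -- intersection empty: no browser name is in processes
    simp only [Bool.not_true]
    rw [List.any_eq_false]
    intro p hp hc
    have hpb : p ∈ browserPatterns := by simpa using hc
    have : p ∈ PySem.Set.inter browserPatterns processes :=
      (PySem.Set.mem_inter _ _ _).mpr ⟨hpb, hp⟩
    rw [List.isEmpty_iff] at h
    simp [h] at this
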